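-- pv_equiv track=rewrite | github.com/MPTGits/HackBulgaria2019 | week_01/week01_solutions.py | group
-- ===== SOURCE A (Python) =====
-- def group(lst):
--     current_list=[]
--     result_list=[]
--     while len(lst)>1:
--         for x in range(len(lst)-1):
--             if lst[x]==lst[x+1]:
--                 current_list.append(lst[x])
--                 continue
--             current_list.append(lst[x])
--             break
--         lst=lst[len(current_list):]
--         if len(lst)==1:
--             current_list=current_list+[current_list[0]]
--         result_list.append(current_list)
--         current_list=[]
--
--     return result_list
-- ===== SOURCE B (Python) =====
-- def group(lst):
--     if len(lst) < 2:
--         return []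
--     runs = []
--     cur = [lst[0]]
--     for x in lst[1:]:
--         if x == cur[0]:
--             cur.append(x)
--         else:
--             runs.append(cur)
--             cur = [x]
--     runs.append(cur)
--     if len(cur) == 1:
--         runs.pop()
--         runs[-1].append(runs[-1][0])
--     return runs
-- ===== Notes on version B (the rewrite author's own statement) =====
-- stated objective: faster
-- what changed: A repeatedly rescans and re-slices the remaining list (one inner scan plus an O(n) slice per run); B builds all runs in a single linear pass with a (finished-runs, current-run) accumulator and applies the trailing-singleton merge as a separate final step.
import Mathlib
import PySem

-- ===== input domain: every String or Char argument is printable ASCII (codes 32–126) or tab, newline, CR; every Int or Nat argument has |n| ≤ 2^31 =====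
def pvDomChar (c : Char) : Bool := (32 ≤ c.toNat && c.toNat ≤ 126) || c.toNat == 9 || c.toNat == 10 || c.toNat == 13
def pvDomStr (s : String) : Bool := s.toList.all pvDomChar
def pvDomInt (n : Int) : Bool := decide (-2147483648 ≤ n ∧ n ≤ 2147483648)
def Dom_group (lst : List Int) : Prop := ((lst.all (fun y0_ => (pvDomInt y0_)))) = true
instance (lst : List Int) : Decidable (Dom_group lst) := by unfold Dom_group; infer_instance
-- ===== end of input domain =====

-- B replaces A's quadratic slice-and-rescan while-loop by a single linear pass that
-- builds all runs once, applying the trailing-singleton merge as a separate final step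
-- (objective: faster).

-- ===== PORT A =====
-- inner 'for x in range(len(lst)-1)' loop of A: the elements appended to current_list
def aCurrent : List Int → List Int
  | a :: b :: t => if a = b then a :: aCurrent (b :: t) else [a]
  | _ => []

theorem aCurrent_pos (lst : List Int) (h : 1 < lst.length) : 0 < (aCurrent lst).length := by
  match lst with
  | a :: b :: t =>
    simp only [aCurrent]
    split <;> simp
  | [] => simp at h
  | [a] => simp at h

def group (lst : List Int) : List (List Int) :=
  if h : 1 < lst.length then
    let cur := aCurrent lst
    let lst2 := lst.drop cur.length
    let cur2 := if lst2.length = 1 then cur ++ [cur.headI] else cur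
    cur2 :: group lst2
  else []
termination_by lst.length
decreasing_by
  simp only [List.length_drop]
  have := aCurrent_pos lst h
  omega

-- ===== PORT B =====
-- one step of B's 'for x in lst[1:]' loop; state = (finished runs, current run)
def bStep (s : List (List Int) × List Int) (x : Int) : List (List Int) × List Int :=
  if x = s.2.headI then (s.1, s.2 ++ [x]) else (s.1 ++ [s.2], [x])

def group_alt (lst : List Int) : List (List Int) :=
  match lst with
  | [] => []
  | [_] => []
  | a :: b :: t =>
    let s := (b :: t).foldl bStep ([], [a])
    let runs := s.1 ++ [s.2]
    if s.2.length = 1 then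
      let rp := runs.dropLast
      rp.dropLast ++ [rp.getLastD [] ++ [(rp.getLastD []).headI]]
    else runs

-- ===== PRECONDITION & SPEC =====
def Spec_group (lst : List Int) (out : List (List Int)) : Prop := out = group_alt lst
instance (lst : List Int) (out : List (List Int)) : Decidable (Spec_group lst out) := by unfold Spec_group; infer_instance

-- ===== CLAIM (what is proved, stated in full; the proofs are below) =====
def Claim_equal_group : Prop := ∀ (lst : List Int), Dom_group lst → Spec_group lst (group lst)

-- ===== LEMMAS AND PROOFS =====


-- bStep only appends to the finished-runs component: a fixed prefix passes through
theorem bStep_prefix : ∀ (t : List Int) (rs0 rs : List (List Int)) (cur : List Int),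
    List.foldl bStep (rs0 ++ rs, cur) t
      = (rs0 ++ (List.foldl bStep (rs, cur) t).1, (List.foldl bStep (rs, cur) t).2) := by
  intro t
  induction t with
  | nil => intro rs0 rs cur; simp
  | cons x t ih =>
    intro rs0 rs cur
    simp only [List.foldl_cons, bStep]
    split
    · exact ih rs0 rs (cur ++ [x])
    · have := ih rs0 (rs ++ [cur]) [x]
      simpa [List.append_assoc] using this

-- the state concatenates back to the processed input
theorem bStep_concat : ∀ (t : List Int) (rs : List (List Int)) (cur : List Int),
    ((List.foldl bStep (rs, cur) t).1).flatten ++ (List.foldl bStep (rs, cur) t).2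
      = rs.flatten ++ cur ++ t := by
  intro t
  induction t with
  | nil => intro rs cur; simp
  | cons x t ih =>
    intro rs cur
    simp only [List.foldl_cons, bStep]
    split
    · rw [ih]; simp
    · rw [ih]; simp

-- processing t from a current run of copies of c: the run absorbs the leading c's
theorem bStep_run : ∀ (t : List Int) (rs : List (List Int)) (c : Int) (cur : List Int),
    cur ≠ [] → (∀ y ∈ cur, y = c) →
    List.foldl bStep (rs, cur) t =
      if h : (t.dropWhile (· = c)) = [] then (rs, cur ++ t)
      else List.foldl bStep (rs ++ [cur ++ t.takeWhile (· = c)],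
            [(t.dropWhile (· = c)).headI]) (t.dropWhile (· = c)).tail := by
  intro t
  induction t with
  | nil => intro rs c cur hne hall; simp
  | cons x t ih =>
    intro rs c cur hne hall
    have hhead : cur.headI = c := by
      cases cur with
      | nil => exact absurd rfl hne
      | cons y ys => exact hall y (by simp)
    simp only [List.foldl_cons, bStep, hhead]
    by_cases hx : x = c
    · have h1 : cur ++ [x] ≠ [] := by simp
      have h2 : ∀ y ∈ cur ++ [x], y = c := by
        intro y hy
        rcases List.mem_append.mp hy with h | h
        · exact hall y h
        · simp at h; omega
      rw [if_pos hx, ih rs c (cur ++ [x]) h1 h2]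
      simp only [List.dropWhile_cons, List.takeWhile_cons, hx, decide_true, if_true]
      split
      · simp
      · simp
    · rw [if_neg hx]
      have hd : (x :: t).dropWhile (· = c) = x :: t := by
        simp [List.dropWhile_cons, hx]
      have ht : (x :: t).takeWhile (· = c) = [] := by
        simp [List.takeWhile_cons, hx]
      rw [dif_neg (by simp [hd])]
      simp [hd, ht]

-- characterisation of A's inner loop
theorem aCurrent_spec : ∀ (a : Int) (t : List Int),
    (if t.dropWhile (· = a) = [] then aCurrent (a :: t) = (a :: t).dropLast
     else aCurrent (a :: t) = a :: t.takeWhile (· = a)) := by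
  intro a t
  induction t generalizing a with
  | nil => simp [aCurrent]
  | cons b t ih =>
    by_cases hab : a = b
    · subst hab
      have h1 := ih a
      simp only [List.dropWhile_cons, List.takeWhile_cons, decide_true, if_true]
      by_cases hc : List.dropWhile (fun x => decide (x = a)) t = []
      · rw [if_pos hc]
        rw [if_pos hc] at h1
        simp [aCurrent, h1]
      · rw [if_neg hc]
        rw [if_neg hc] at h1
        simp [aCurrent, h1]
    · simp only [aCurrent, if_neg hab, List.dropWhile_cons, List.takeWhile_cons]
      have : (decide (b = a)) = false := by simp [Ne.symm hab]
      simp [this]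

-- all elements equal after dropWhile = []
theorem all_eq_of_dropWhile_nil {a : Int} {t : List Int}
    (h : t.dropWhile (· = a) = []) : ∀ y ∈ t, y = a := by
  intro y hy
  have := List.dropWhile_eq_nil_iff.mp h
  simpa using this y hy

-- B recurrence, case: whole list is one run
theorem galt_single (a b : Int) (t : List Int)
    (h : (b :: t).dropWhile (· = a) = []) :
    group_alt (a :: b :: t) = [a :: b :: t] := by
  have hrun := bStep_run (b :: t) [] a [a] (by simp) (by simp)
  rw [dif_pos h] at hrun
  simp only [group_alt, hrun]
  have : (a :: b :: t).length ≠ 1 := by simp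
  simp

-- B recurrence, case: rest is a single element
theorem galt_last (a b z : Int) (t : List Int)
    (h : (b :: t).dropWhile (· = a) = [z]) :
    group_alt (a :: b :: t) = [(a :: (b :: t).takeWhile (· = a)) ++ [a]] := by
  have hrun := bStep_run (b :: t) [] a [a] (by simp) (by simp)
  rw [dif_neg (by simp [h])] at hrun
  simp only [h] at hrun
  simp only [group_alt, hrun]
  simp [List.dropLast_concat]

-- B recurrence, step case
theorem galt_step (a b h2 b2 : Int) (t t3 : List Int)
    (h : (b :: t).dropWhile (· = a) = h2 :: b2 :: t3) :
    group_alt (a :: b :: t)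
      = (a :: (b :: t).takeWhile (· = a)) :: group_alt (h2 :: b2 :: t3) := by
  have hrun := bStep_run (b :: t) [] a [a] (by simp) (by simp)
  rw [dif_neg (by simp [h])] at hrun
  simp only [h, List.headI, List.tail_cons] at hrun
  set r : List Int := a :: (b :: t).takeWhile (· = a) with hr
  set s' := List.foldl bStep ([], [h2]) (b2 :: t3) with hs'
  have hpre := bStep_prefix (b2 :: t3) [r] [] [h2]
  simp only [List.append_nil, ← hs'] at hpre
  have hrun2 : List.foldl bStep ([], [a]) (b :: t) = ([r] ++ s'.1, s'.2) := by
    rw [hrun]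
    rw [show ([] : List (List Int)) ++ [[a] ++ (b :: t).takeWhile (· = a)] = [r] by simp [hr]]
    exact hpre
  have hrun2' : List.foldl bStep (bStep ([], [a]) b) t = ([r] ++ s'.1, s'.2) := by
    rw [← List.foldl_cons]; exact hrun2
  have hfold : List.foldl bStep (bStep ([], [h2]) b2) t3 = s' := by
    rw [hs', List.foldl_cons]
  have hcc := bStep_concat (b2 :: t3) [] [h2]
  rw [← hs'] at hcc
  simp only [group_alt, hrun2, hrun2', hfold]
  by_cases hone : s'.2.length = 1
  · have hs1ne : s'.1 ≠ [] := by
      intro hnil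
      rw [hnil] at hcc
      simp only [List.flatten_nil, List.nil_append] at hcc
      rw [hcc] at hone
      simp at hone
    rw [if_pos hone, if_pos hone]
    obtain ⟨u, us, hs1⟩ : ∃ u us, s'.1 = u :: us := by
      cases h1 : s'.1 with
      | nil => exact absurd h1 hs1ne
      | cons u us => exact ⟨u, us, rfl⟩
    rw [hs1]
    rw [show ([r] ++ u :: us) ++ [s'.2] = (r :: u :: us) ++ [s'.2] by simp]
    rw [List.dropLast_concat, List.dropLast_concat]
    simp
  · rw [if_neg hone]
    simp [group_alt, hfold, hone]

theorem main_lemma : ∀ (n : Nat) (lst : List Int), lst.length ≤ n → group lst = group_alt lst := by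
  intro n
  induction n with
  | zero =>
    intro lst hl
    have : lst = [] := List.length_eq_zero_iff.mp (Nat.le_zero.mp hl)
    subst this
    rw [group]
    simp [group_alt]
  | succ n ih =>
    intro lst hl
    match lst with
    | [] => rw [group]; simp [group_alt]
    | [x] => rw [group]; simp [group_alt]
    | a :: b :: t =>
      have hspec := aCurrent_spec a (b :: t)
      have hsplit : (b :: t).takeWhile (· = a) ++ (b :: t).dropWhile (· = a) = b :: t :=
        List.takeWhile_append_dropWhile
      cases hrest : (b :: t).dropWhile (· = a) with
      | nil =>
        -- whole list is one run of a's
        rw [if_pos hrest] at hspec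
        have hall : ∀ y ∈ b :: t, y = a := all_eq_of_dropWhile_nil hrest
        have hrep : (a :: b :: t) = List.replicate (t.length + 2) a := by
          rw [List.eq_replicate_iff]
          refine ⟨by simp, ?_⟩
          intro y hy
          rcases List.mem_cons.mp hy with rfl | h
          · rfl
          · exact hall y h
        rw [galt_single a b t hrest]
        rw [group, dif_pos (by simp)]
        simp only [hspec]
        rw [hrep]
        rw [show (List.replicate (t.length + 2) a).dropLast = List.replicate (t.length + 1) a by
          simp [List.dropLast_eq_take, List.take_replicate]]
        rw [show (List.replicate (t.length + 1) a).length = t.length + 1 by simp]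
        rw [show (List.replicate (t.length + 2) a).drop (t.length + 1) = [a] by
          simp [List.drop_replicate]]
        rw [group]
        simp [List.replicate_succ']
        cases t.length with
        | zero => simp
        | succ k => simp [List.replicate_succ]
      | cons h2 t2 =>
        rw [if_neg (by simp [hrest])] at hspec
        have hlst : (a :: b :: t) = (a :: (b :: t).takeWhile (· = a)) ++ (h2 :: t2) := by
          simp only [List.cons_append]
          rw [hrest] at hsplit
          rw [hsplit]
        have hdrop : (a :: b :: t).drop
            ((List.takeWhile (fun x => decide (x = a)) (b :: t)).length + 1) = h2 :: t2 := by
          conv_lhs => rw [hlst]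
          rw [show (List.takeWhile (fun x => decide (x = a)) (b :: t)).length + 1
                = (a :: (b :: t).takeWhile (· = a)).length by simp]
          exact List.drop_left
        rw [group, dif_pos (by simp)]
        simp only [hspec, List.length_cons, hdrop]
        cases t2 with
        | nil =>
          rw [group]
          simp only [List.length_cons, List.length_nil]
          rw [dif_neg (by omega)]
          rw [galt_last a b h2 t hrest]
          simp
        | cons b2 t3 =>
          rw [if_neg (by simp)]
          rw [galt_step a b h2 b2 t t3 hrest]
          have hlen : (h2 :: b2 :: t3).length ≤ n := by
            have h1 : ((b :: t).dropWhile (· = a)).length ≤ (b :: t).length :=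
              List.Sublist.length_le (List.dropWhile_sublist _)
            rw [hrest] at h1
            simp only [List.length_cons] at h1 hl ⊢
            omega
          rw [ih (h2 :: b2 :: t3) hlen]

-- ===== VERDICT (by name: the statement is the Claim_ definition above) =====
theorem group_spec : Claim_equal_group := by
  intro lst _
  exact main_lemma lst.length lst le_rfl
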